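-- pv_equiv track=rewrite | github.com/Domwis-IR/codetree-TILs | 241031/행복한 수열의 개수/number-of-happy-sequence.py | check
-- ===== SOURCE A (Python) =====
-- def check(lst, m):
--     if not lst:  # 리스트가 비어 있는 경우
--         return 0
--
--     max_count = 1  # 최대 연속된 수의 개수
--     current_count = 1  # 현재 연속된 수의 개수
--
--     for i in range(1, len(lst)):
--         if lst[i] == lst[i - 1]:  # 이전 요소와 동일하다면
--             current_count += 1
--         else:  # 다르면 연속된 수가 끊기므로 초기화
--             max_count = max(max_count, current_count)  # 최대값 갱신
--             current_count = 1  # 현재 연속된 수 초기화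
--
--     max_count = max(max_count, current_count)  # 마지막 연속된 수의 최대값 갱신
--     if max_count >= m:
--         return True
--     return False
-- ===== SOURCE B (Python) =====
-- def check(lst, m):
--     # Run boundaries: indices where the value changes, fenced by 0 and n.
--     # The longest run is the largest gap between consecutive boundaries.
--     n = len(lst)
--     bounds = [0] + [i for i in range(1, n) if lst[i] != lst[i - 1]] + [n]
--     return max(b - a for a, b in zip(bounds, bounds[1:])) >= m
-- ===== Notes on version B (the rewrite author's own statement) =====
-- stated objective: alternative
-- what changed: B keeps no running counters: it collects the boundary indices where the value changes (fenced by 0 and n) in one comprehension, forms the gaps between consecutive boundaries with zip, and compares their max with m.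
-- outside the precondition, e.g. on check([], 1): A returns 0, B returns False
import Mathlib
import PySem

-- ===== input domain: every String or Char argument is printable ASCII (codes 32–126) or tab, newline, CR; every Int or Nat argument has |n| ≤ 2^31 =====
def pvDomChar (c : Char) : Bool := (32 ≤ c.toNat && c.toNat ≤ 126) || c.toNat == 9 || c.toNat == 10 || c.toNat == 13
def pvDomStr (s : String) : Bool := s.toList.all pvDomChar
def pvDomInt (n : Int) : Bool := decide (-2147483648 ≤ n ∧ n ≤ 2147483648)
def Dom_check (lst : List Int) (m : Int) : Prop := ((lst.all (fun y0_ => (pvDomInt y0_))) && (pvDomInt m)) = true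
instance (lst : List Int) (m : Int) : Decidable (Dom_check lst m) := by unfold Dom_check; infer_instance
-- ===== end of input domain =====

-- B keeps no running counters: it collects the boundary indices where the value changes
-- (fenced by 0 and n), forms the gaps between consecutive boundaries with zip, and compares
-- their max with m (objective: alternative). Pre_ excludes the empty list, on which A
-- returns the int 0 instead of a bool.


-- ===== PORT A =====
-- 'for i in range(1, len(lst))' with state (max_count, current_count); the indices are
-- always in range, so lst[i] is pyGetD with an unused default.
def check (lst : List Int) (m : Int) : Bool :=
  if lst.isEmpty then false   -- A returns the int 0 here (not a bool); excluded by Pre_check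
  else
    let s := (PySem.List.pyRange 1 (lst.length : Int) 1).foldl
      (fun (st : Int × Int) i =>
        if PySem.List.pyGetD lst i 0 == PySem.List.pyGetD lst (i - 1) 0
        then (st.1, st.2 + 1)
        else (max st.1 st.2, 1))
      ((1 : Int), (1 : Int))
    decide (max s.1 s.2 ≥ m)

-- ===== PORT B =====
-- bounds = [0] + [i for i in range(1, n) if lst[i] != lst[i-1]] + [n];
-- max(b - a for a, b in zip(bounds, bounds[1:])) >= m.  bounds always has ≥ 2 elements,
-- so the generator is nonempty and Python's max returns (the 'none' arm is unreachable).
def check_alt (lst : List Int) (m : Int) : Bool :=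
  let n : Int := lst.length
  let bounds := (0 :: (PySem.List.pyRange 1 n 1).filter
      (fun i => !(PySem.List.pyGetD lst i 0 == PySem.List.pyGetD lst (i - 1) 0))) ++ [n]
  match PySem.List.max?
      ((bounds.zip (PySem.List.slice bounds (some 1) none)).map (fun p => p.2 - p.1))
      (fun g => g) with
  | some v => decide (v ≥ m)
  | none => false

-- ===== PRECONDITION & SPEC =====
-- Pre_ excludes only the empty list: there A returns the int 0, which is not a bool.
def Pre_check (lst : List Int) (m : Int) : Prop := lst ≠ []
instance (lst : List Int) (m : Int) : Decidable (Pre_check lst m) := by unfold Pre_check; infer_instance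

def pvWitness_check : List Int × Int := ([1, 1, 2], 2)

def Spec_check (lst : List Int) (m : Int) (out : Bool) : Prop := out = check_alt lst m
instance (lst : List Int) (m : Int) (out : Bool) : Decidable (Spec_check lst m out) := by unfold Spec_check; infer_instance

-- ===== CLAIM (what is proved, stated in full; the proofs are below) =====
def Claim_equal_check : Prop := ∀ (lst : List Int) (m : Int), Dom_check lst m → Pre_check lst m → Spec_check lst m (check lst m)

-- ===== LEMMAS AND PROOFS =====

-- Run lengths of the list (proof-side common ground between the two ports).
def runLenGo (cur : Int) (cnt : Int) : List Int → List Int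
  | [] => [cnt]
  | y :: ys => if y == cur then runLenGo cur (cnt + 1) ys else cnt :: runLenGo y 1 ys

def runLengths : List Int → List Int
  | [] => []
  | x :: xs => runLenGo x 1 xs

-- A's loop, rephrased structurally over the suffix after the current previous element.
def loopAux (prev : Int) (st : Int × Int) : List Int → Int × Int
  | [] => st
  | y :: ys => loopAux y (if y == prev then (st.1, st.2 + 1) else (max st.1 st.2, 1)) ys

-- B's boundary comprehension, rephrased structurally: indices ≥ a where the value changes.
def chg (prev : Int) (a : Int) : List Int → List Int
  | [] => []
  | y :: ys => if y == prev then chg prev (a + 1) ys else a :: chg y (a + 1) ys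

-- gaps between consecutive elements (the zip/map of B).
def gaps (L : List Int) : List Int := (L.zip L.tail).map (fun p => p.2 - p.1)

theorem foldl_max_shift (L : List Int) : ∀ a b : Int,
    L.foldl max (max a b) = max a (L.foldl max b) := by
  induction L with
  | nil => intro a b; simp
  | cons x t ih =>
      intro a b
      simp only [List.foldl_cons]
      rw [max_assoc, ih]

-- A's index loop over range(a, len) equals loopAux on the suffix from a-1.
theorem core (lst : List Int) (k : Nat) : ∀ (a : Nat) (st : Int × Int) (prev : Int) (rest : List Int),
    a + k = lst.length → 1 ≤ a → lst.drop (a - 1) = prev :: rest →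
    (PySem.List.pyRange (a : Int) (lst.length : Int) 1).foldl
      (fun (st : Int × Int) i =>
        if PySem.List.pyGetD lst i 0 == PySem.List.pyGetD lst (i - 1) 0
        then (st.1, st.2 + 1)
        else (max st.1 st.2, 1)) st
      = loopAux prev st rest := by
  induction k with
  | zero =>
      intro a st prev rest h1 h2 h3
      have ha : a = lst.length := by omega
      have hlen : (lst.drop (a - 1)).length = 1 := by
        rw [List.length_drop]; omega
      rw [h3] at hlen
      simp at hlen
      subst hlen
      rw [PySem.List.pyRange_one_eq_nil (by exact_mod_cast ha.symm.le)]
      simp [loopAux]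
  | succ n ih =>
      intro a st prev rest h1 h2 h3
      have hlt : a < lst.length := by omega
      have hdrop : lst.drop a = rest := by
        have : lst.drop (a - 1) = prev :: rest := h3
        have h' : lst.drop ((a - 1) + 1) = rest := by
          rw [← List.drop_drop, this]; rfl
        have : (a - 1) + 1 = a := by omega
        rwa [this] at h'
      have hrest : rest ≠ [] := by
        intro h
        have := congrArg List.length hdrop
        rw [h, List.length_drop] at this
        simp at this; omega
      obtain ⟨y, rest', hy⟩ := List.exists_cons_of_ne_nil hrest
      have hya : lst[a]'hlt = y := by
        have h0 : lst[a]? = some y := by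
          rw [← Nat.add_zero a, ← List.getElem?_drop, hdrop, hy]; rfl
        simpa [List.getElem?_eq_getElem hlt] using h0
      have hprev : lst[a-1]'(by omega) = prev := by
        have h0 : lst[a-1]? = some prev := by
          rw [← Nat.add_zero (a-1), ← List.getElem?_drop, h3]; rfl
        simpa [List.getElem?_eq_getElem (show a-1 < lst.length by omega)] using h0
      rw [PySem.List.pyRange_one_cons (by exact_mod_cast hlt)]
      simp only [List.foldl_cons]
      have hga : PySem.List.pyGetD lst (a : Int) 0 = y := by
        rw [PySem.List.pyGetD_eq_getElem lst 0 (by exact_mod_cast Nat.zero_le a) (by exact_mod_cast hlt)]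
        simpa using hya
      have hgp : PySem.List.pyGetD lst ((a : Int) - 1) 0 = prev := by
        have hcast : (a : Int) - 1 = ((a - 1 : Nat) : Int) := by omega
        rw [hcast, PySem.List.pyGetD_eq_getElem lst 0 (by exact_mod_cast Nat.zero_le (a-1)) (by exact_mod_cast (by omega : a - 1 < lst.length))]
        simpa using hprev
      rw [hga, hgp]
      have hcast1 : (a : Int) + 1 = ((a + 1 : Nat) : Int) := by push_cast; ring
      rw [hcast1, ih (a + 1) _ y rest' (by omega) (by omega) (by rw [Nat.add_sub_cancel, hdrop, hy])]
      rw [hy]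
      simp only [loopAux]

theorem loopAux_go (ys : List Int) : ∀ (prev mc cc : Int), 1 ≤ cc →
    max (loopAux prev (mc, cc) ys).1 (loopAux prev (mc, cc) ys).2
      = max mc ((runLenGo prev cc ys).foldl max 0) := by
  induction ys with
  | nil =>
      intro prev mc cc hcc
      simp [loopAux, runLenGo]
      omega
  | cons y t ih =>
      intro prev mc cc hcc
      by_cases h : y == prev
      · have hyp : y = prev := eq_of_beq h
        subst hyp
        simp only [loopAux, runLenGo, h, if_pos]
        exact ih y mc (cc + 1) (by omega)
      · simp only [loopAux, runLenGo, h, if_neg, Bool.false_eq_true, not_false_iff]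
        rw [ih y (max mc cc) 1 (by omega)]
        simp only [List.foldl_cons]
        rw [show max (0 : Int) cc = max cc 0 from max_comm 0 cc, foldl_max_shift]
        omega

theorem go_ge (ys : List Int) : ∀ (prev cc : Int), cc ≤ (runLenGo prev cc ys).foldl max 0 := by
  induction ys with
  | nil => intro prev cc; simp [runLenGo]
  | cons y t ih =>
      intro prev cc
      by_cases h : y == prev
      · have hyp : y = prev := eq_of_beq h
        subst hyp
        simp only [runLenGo, h, if_pos]
        have := ih y (cc + 1)
        omega
      · simp only [runLenGo, h, if_neg, Bool.false_eq_true, not_false_iff]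
        simp only [List.foldl_cons]
        have h1 : max (0 : Int) cc ≤ (runLenGo y 1 t).foldl max (max 0 cc) :=
          (PySem.List.le_foldl_max (runLenGo y 1 t) (max 0 cc)).1
        omega

-- A computes decide ((runLengths lst).foldl max 0 ≥ m) on a nonempty list.
theorem check_eq_maxRun (x : Int) (xs : List Int) (m : Int) :
    check (x :: xs) m = decide (m ≤ (runLengths (x :: xs)).foldl max 0) := by
  unfold check
  simp only [List.isEmpty_cons, Bool.false_eq_true, if_false]
  have hcore := core (x :: xs) xs.length 1 ((1 : Int), (1 : Int)) x xs
    (by simp [Nat.add_comm]) (le_refl 1) (by simp)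
  simp only [Nat.cast_one] at hcore
  simp only [hcore, loopAux_go xs x 1 1 (le_refl 1)]
  have hge := go_ge xs x 1
  have hmax : max (1 : Int) ((runLenGo x 1 xs).foldl max 0) = (runLenGo x 1 xs).foldl max 0 :=
    max_eq_right hge
  simp only [hmax]
  rfl

-- B's filtered index range equals chg on the suffix from a-1.
theorem coreB (lst : List Int) (k : Nat) : ∀ (a : Nat) (prev : Int) (rest : List Int),
    a + k = lst.length → 1 ≤ a → lst.drop (a - 1) = prev :: rest →
    (PySem.List.pyRange (a : Int) (lst.length : Int) 1).filter
      (fun i => !(PySem.List.pyGetD lst i 0 == PySem.List.pyGetD lst (i - 1) 0))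
      = chg prev (a : Int) rest := by
  induction k with
  | zero =>
      intro a prev rest h1 h2 h3
      have ha : a = lst.length := by omega
      have hlen : (lst.drop (a - 1)).length = 1 := by
        rw [List.length_drop]; omega
      rw [h3] at hlen
      simp at hlen
      subst hlen
      rw [PySem.List.pyRange_one_eq_nil (by exact_mod_cast ha.symm.le)]
      simp [chg]
  | succ n ih =>
      intro a prev rest h1 h2 h3
      have hlt : a < lst.length := by omega
      have hdrop : lst.drop a = rest := by
        have : lst.drop (a - 1) = prev :: rest := h3
        have h' : lst.drop ((a - 1) + 1) = rest := by
          rw [← List.drop_drop, this]; rfl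
        have : (a - 1) + 1 = a := by omega
        rwa [this] at h'
      have hrest : rest ≠ [] := by
        intro h
        have := congrArg List.length hdrop
        rw [h, List.length_drop] at this
        simp at this; omega
      obtain ⟨y, rest', hy⟩ := List.exists_cons_of_ne_nil hrest
      have hya : lst[a]'hlt = y := by
        have h0 : lst[a]? = some y := by
          rw [← Nat.add_zero a, ← List.getElem?_drop, hdrop, hy]; rfl
        simpa [List.getElem?_eq_getElem hlt] using h0
      have hprev : lst[a-1]'(by omega) = prev := by
        have h0 : lst[a-1]? = some prev := by
          rw [← Nat.add_zero (a-1), ← List.getElem?_drop, h3]; rfl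
        simpa [List.getElem?_eq_getElem (show a-1 < lst.length by omega)] using h0
      rw [PySem.List.pyRange_one_cons (by exact_mod_cast hlt)]
      rw [List.filter_cons]
      have hga : PySem.List.pyGetD lst (a : Int) 0 = y := by
        rw [PySem.List.pyGetD_eq_getElem lst 0 (by exact_mod_cast Nat.zero_le a) (by exact_mod_cast hlt)]
        simpa using hya
      have hgp : PySem.List.pyGetD lst ((a : Int) - 1) 0 = prev := by
        have hcast : (a : Int) - 1 = ((a - 1 : Nat) : Int) := by omega
        rw [hcast, PySem.List.pyGetD_eq_getElem lst 0 (by exact_mod_cast Nat.zero_le (a-1)) (by exact_mod_cast (by omega : a - 1 < lst.length))]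
        simpa using hprev
      rw [hga, hgp]
      have hcast1 : (a : Int) + 1 = ((a + 1 : Nat) : Int) := by push_cast; ring
      have ihy := ih (a + 1) y rest' (by omega) (by omega)
        (by rw [Nat.add_sub_cancel, hdrop, hy])
      rw [hy]
      by_cases h : y == prev
      · simp only [chg, h, if_pos, Bool.not_true]
        rw [hcast1, ihy]
        have hyp : y = prev := eq_of_beq h
        subst hyp
        rfl
      · simp only [chg, h, Bool.false_eq_true, if_neg, not_false_iff]
        rw [hcast1, ihy]
        simp

theorem gaps_cons (a b : Int) (t : List Int) :
    gaps (a :: b :: t) = (b - a) :: gaps (b :: t) := rfl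

-- gaps over the fenced boundary list are exactly the run lengths.
theorem gaps_chg (ys : List Int) : ∀ (prev b0 a : Int),
    gaps (b0 :: (chg prev a ys ++ [a + (ys.length : Int)])) = runLenGo prev (a - b0) ys := by
  induction ys with
  | nil => intro prev b0 a; simp [chg, gaps, runLenGo]
  | cons y t ih =>
      intro prev b0 a
      by_cases h : y == prev
      · have hyp : y = prev := eq_of_beq h
        simp only [chg, runLenGo, h, if_pos]
        have hlen : a + ((t.length + 1 : Nat) : Int) = (a + 1) + (t.length : Int) := by
          push_cast; ring
        rw [List.length_cons, hlen, ih prev b0 (a + 1)]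
        have : a + 1 - b0 = a - b0 + 1 := by ring
        rw [this]
      · simp only [chg, runLenGo, h, Bool.false_eq_true, if_neg, not_false_iff]
        have hlen : a + ((t.length + 1 : Nat) : Int) = (a + 1) + (t.length : Int) := by
          push_cast; ring
        rw [List.length_cons, hlen, List.cons_append, gaps_cons, ih y a (a + 1)]
        have : a + 1 - a = 1 := by ring
        rw [this]

-- every run length is ≥ min over the running count; with count 1 all are ≥ 1.
theorem runLenGo_pos (ys : List Int) : ∀ (prev cnt : Int), 1 ≤ cnt →
    ∀ c ∈ runLenGo prev cnt ys, 1 ≤ c := by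
  induction ys with
  | nil => intro prev cnt h c hc; simp [runLenGo] at hc; omega
  | cons y t ih =>
      intro prev cnt h c hc
      by_cases hy : y == prev
      · simp only [runLenGo, hy, if_pos] at hc
        exact ih prev (cnt + 1) (by omega) c hc
      · simp only [runLenGo, hy, Bool.false_eq_true, if_neg, not_false_iff,
          List.mem_cons] at hc
        rcases hc with rfl | hc
        · exact h
        · exact ih y 1 (le_refl 1) c hc

theorem runLenGo_ne_nil (ys : List Int) : ∀ (prev cnt : Int), runLenGo prev cnt ys ≠ [] := by
  induction ys with
  | nil => intro prev cnt; simp [runLenGo]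
  | cons y t ih =>
      intro prev cnt
      by_cases hy : y == prev
      · simp only [runLenGo, hy, if_pos]; exact ih prev (cnt + 1)
      · simp [runLenGo, hy]

-- B computes decide ((runLengths lst).foldl max 0 ≥ m) on a nonempty list.
theorem check_alt_eq_maxRun (x : Int) (xs : List Int) (m : Int) :
    check_alt (x :: xs) m = decide (m ≤ (runLengths (x :: xs)).foldl max 0) := by
  unfold check_alt
  simp only [PySem.List.slice_from_one]
  have hcore := coreB (x :: xs) xs.length 1 x xs
    (by simp [Nat.add_comm]) (le_refl 1) (by simp)
  simp only [Nat.cast_one] at hcore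
  rw [hcore]
  have hlen : ((x :: xs).length : Int) = 1 + (xs.length : Int) := by
    simp [List.length_cons]; ring
  have hgaps : gaps ((0 : Int) :: (chg x 1 xs ++ [((x :: xs).length : Int)]))
      = runLenGo x 1 xs := by
    rw [hlen]
    have := gaps_chg xs x 0 1
    simpa using this
  -- the zip/map of the port is gaps of the fenced boundary list
  have hzip : ∀ (L : List Int),
      (L.zip L.tail).map (fun p : Int × Int => p.2 - p.1) = gaps L := fun _ => rfl
  rw [List.cons_append, hzip, hgaps]
  obtain ⟨h, t, ht⟩ : ∃ h t, runLenGo x 1 xs = h :: t := by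
    rcases hr : runLenGo x 1 xs with _ | ⟨h, t⟩
    · exact absurd hr (runLenGo_ne_nil xs x 1)
    · exact ⟨h, t, rfl⟩
  have hh : 1 ≤ h := runLenGo_pos xs x 1 (le_refl 1) h (by rw [ht]; exact List.mem_cons_self)
  rw [ht, PySem.List.max?_id_cons]
  simp only [runLengths, ht, List.foldl_cons]
  have : max (0 : Int) h = h := by omega
  rw [this]

-- ===== VERDICT (by name: the statement is the Claim_ definition above) =====
theorem check_spec : Claim_equal_check := by
  intro lst m _ hpre
  unfold Spec_check
  obtain ⟨x, xs, rfl⟩ := List.exists_cons_of_ne_nil hpre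
  rw [check_eq_maxRun, check_alt_eq_maxRun]
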